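-- pv_equiv track=rewrite | github.com/Hiroshiba/check_cross_lingual_phoneme_map | check_epitran_openjtalk.py | split_by_silence_markers
-- ===== SOURCE A (Python) =====
-- def split_by_silence_markers(phoneme_labels: str) -> list[str]:
--     """
--     音素ラベル列をpauまたはsilで分割する
--
--     Args:
--         phoneme_labels: スペース区切りの音素ラベル列
--
--     Returns:
--         pauまたはsilで分割されたセグメントのリスト
--     """
--     phonemes = phoneme_labels.split(" ")
--     segments = []
--     current_segment = []
--
--     for phoneme in phonemes:
--         if phoneme == "pau" or phoneme == "sil":
--             if current_segment:
--                 segments.append(" ".join(current_segment))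
--                 current_segment = []
--         else:
--             current_segment.append(phoneme)
--
--     # 最後のセグメントを追加
--     if current_segment:
--         segments.append(" ".join(current_segment))
--
--     return segments
-- ===== SOURCE B (Python) =====
-- def split_by_silence_markers(phoneme_labels: str) -> list[str]:
--     """pau/silで区切られた非マーカートークンの連続区間を切り出す（区間スキャン方式）"""
--     tokens = phoneme_labels.split(" ")
--     n = len(tokens)
--     segments = []
--     i = 0
--     while i < n:
--         if tokens[i] == "pau" or tokens[i] == "sil":
--             i += 1
--         else:
--             j = i
--             while j < n and tokens[j] != "pau" and tokens[j] != "sil":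
--                 j += 1
--             segments.append(" ".join(tokens[i:j]))
--             i = j
--     return segments
-- ===== Notes on version B (the rewrite author's own statement) =====
-- stated objective: alternative
-- what changed: Replaces the accumulator-and-flush loop by a two-pointer run scan: each maximal run of non-marker tokens is located and joined in one step, with no current_segment state or final flush.
import Mathlib
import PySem

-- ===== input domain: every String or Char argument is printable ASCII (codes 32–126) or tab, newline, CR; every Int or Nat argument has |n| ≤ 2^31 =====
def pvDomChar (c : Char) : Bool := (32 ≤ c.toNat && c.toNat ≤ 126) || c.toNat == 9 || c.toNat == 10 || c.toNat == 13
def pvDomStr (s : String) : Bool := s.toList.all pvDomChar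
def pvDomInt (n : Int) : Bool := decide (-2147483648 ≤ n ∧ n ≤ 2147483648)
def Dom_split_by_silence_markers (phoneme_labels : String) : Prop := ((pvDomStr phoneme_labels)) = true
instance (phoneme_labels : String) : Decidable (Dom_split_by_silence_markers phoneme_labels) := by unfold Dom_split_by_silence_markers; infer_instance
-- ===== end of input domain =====

-- B replaces A's accumulator-and-flush loop by a two-pointer run scan over the token list (alternative decomposition, same cost).

-- ===== PORT A =====
-- A's loop body: state is (segments so far, current_segment)
def pvStepA (st : List String × List String) (p : String) : List String × List String :=
  if p == "pau" || p == "sil" then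
    if st.2 ≠ [] then (st.1 ++ [PySem.Str.join " " st.2], []) else st
  else (st.1, st.2 ++ [p])

-- A's final flush after the loop
def pvFinA (st : List String × List String) : List String :=
  if st.2 ≠ [] then st.1 ++ [PySem.Str.join " " st.2] else st.1

def split_by_silence_markers (phoneme_labels : String) : List String :=
  pvFinA (((PySem.Str.split? phoneme_labels " ").getD []).foldl pvStepA ([], []))

-- ===== PORT B =====
def pvIsMarker (t : String) : Bool := t == "pau" || t == "sil"

-- B's outer while: skip a marker, or take the maximal non-marker run (the inner while
-- computing j is the takeWhile/dropWhile split of the remaining tokens).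
def pvScanB : List String → List String
  | [] => []
  | t :: ts =>
    if pvIsMarker t then pvScanB ts
    else
      PySem.Str.join " " ((t :: ts).takeWhile (fun x => !pvIsMarker x))
        :: pvScanB ((t :: ts).dropWhile (fun x => !pvIsMarker x))
  termination_by l => l.length
  decreasing_by
    · simp
    · simp only [List.dropWhile]
      simp_all
      have := List.length_dropWhile_le (fun x => !pvIsMarker x) ts
      omega

def split_by_silence_markers_alt (phoneme_labels : String) : List String :=
  pvScanB ((PySem.Str.split? phoneme_labels " ").getD [])

-- ===== PRECONDITION & SPEC =====
def Spec_split_by_silence_markers (phoneme_labels : String) (out : List String) : Prop := out = split_by_silence_markers_alt phoneme_labels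
instance (phoneme_labels : String) (out : List String) : Decidable (Spec_split_by_silence_markers phoneme_labels out) := by unfold Spec_split_by_silence_markers; infer_instance

-- ===== CLAIM (what is proved, stated in full; the proofs are below) =====
def Claim_equal_split_by_silence_markers : Prop := ∀ (phoneme_labels : String), Dom_split_by_silence_markers phoneme_labels → Spec_split_by_silence_markers phoneme_labels (split_by_silence_markers phoneme_labels)

-- ===== LEMMAS AND PROOFS =====

theorem pvTakeWhile_all {cur : List String} (h : ∀ x ∈ cur, pvIsMarker x = false) :
    cur.takeWhile (fun x => !pvIsMarker x) = cur := by
  induction cur with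
  | nil => rfl
  | cons a l ih =>
    simp [List.takeWhile, h a (by simp)]
    intro x hx
    simp [h x (by simp [hx])]

theorem pvDropWhile_all {cur : List String} (h : ∀ x ∈ cur, pvIsMarker x = false) :
    cur.dropWhile (fun x => !pvIsMarker x) = [] := by
  induction cur with
  | nil => rfl
  | cons a l ih =>
    simp [List.dropWhile, h a (by simp)]
    intro x hx
    simp [h x (by simp [hx])]

theorem pvTakeWhile_append {cur : List String} {p : String} {ts : List String}
    (h : ∀ x ∈ cur, pvIsMarker x = false) (hp : pvIsMarker p = true) :
    (cur ++ p :: ts).takeWhile (fun x => !pvIsMarker x) = cur := by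
  induction cur with
  | nil => simp [hp]
  | cons a l ih =>
    simp only [List.cons_append, List.takeWhile, h a (by simp)]
    simp
    exact ih (fun x hx => h x (by simp [hx]))

theorem pvDropWhile_append {cur : List String} {p : String} {ts : List String}
    (h : ∀ x ∈ cur, pvIsMarker x = false) (hp : pvIsMarker p = true) :
    (cur ++ p :: ts).dropWhile (fun x => !pvIsMarker x) = p :: ts := by
  induction cur with
  | nil => simp [hp]
  | cons a l ih =>
    simp only [List.cons_append, List.dropWhile, h a (by simp)]
    simp
    exact ih (fun x hx => h x (by simp [hx]))

theorem pvScanB_cons_marker {p : String} {ts : List String} (hp : pvIsMarker p = true) :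
    pvScanB (p :: ts) = pvScanB ts := by
  rw [pvScanB]
  simp [hp]

-- pvScanB on a marker-free nonempty list produces the single joined segment
theorem pvScanB_all {cur : List String} (h : ∀ x ∈ cur, pvIsMarker x = false) (hne : cur ≠ []) :
    pvScanB cur = [PySem.Str.join " " cur] := by
  cases cur with
  | nil => exact absurd rfl hne
  | cons a l =>
    rw [pvScanB]
    simp only [h a (by simp)]
    rw [pvTakeWhile_all h, pvDropWhile_all h]
    simp [pvScanB]

-- a marker-free nonempty run followed by a marker is emitted as one segment
theorem pvScanB_run {cur : List String} {p : String} {ts : List String}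
    (h : ∀ x ∈ cur, pvIsMarker x = false) (hne : cur ≠ []) (hp : pvIsMarker p = true) :
    pvScanB (cur ++ p :: ts) = PySem.Str.join " " cur :: pvScanB ts := by
  cases cur with
  | nil => exact absurd rfl hne
  | cons a l =>
    rw [List.cons_append, pvScanB]
    simp only [h a (by simp), Bool.false_eq_true, if_false]
    rw [← List.cons_append, pvTakeWhile_append h hp, pvDropWhile_append h hp,
        pvScanB_cons_marker hp]

-- main invariant: A's loop from state (acc, cur), cur marker-free, finishes as acc ++ pvScanB (cur ++ ts)
theorem pvInv (ts : List String) : ∀ (acc cur : List String),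
    (∀ x ∈ cur, pvIsMarker x = false) →
    pvFinA (ts.foldl pvStepA (acc, cur)) = acc ++ pvScanB (cur ++ ts) := by
  induction ts with
  | nil =>
    intro acc cur h
    simp only [List.foldl_nil, List.append_nil, pvFinA]
    by_cases hc : cur = []
    · simp [hc, pvScanB]
    · simp [hc, pvScanB_all h hc]
  | cons p ts ih =>
    intro acc cur h
    simp only [List.foldl_cons]
    by_cases hp : pvIsMarker p = true
    · by_cases hc : cur = []
      · subst hc
        have hstep : pvStepA (acc, []) p = (acc, []) := by
          simp [pvStepA, pvIsMarker] at hp ⊢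
          rcases hp with hp | hp <;> simp [hp]
        rw [hstep, ih acc [] (by simp)]
        simp [pvScanB_cons_marker hp]
      · have hstep : pvStepA (acc, cur) p = (acc ++ [PySem.Str.join " " cur], []) := by
          simp [pvStepA, pvIsMarker] at hp ⊢
          rcases hp with hp | hp <;> simp [hp, hc]
        rw [hstep, ih (acc ++ [PySem.Str.join " " cur]) [] (by simp)]
        rw [pvScanB_run h hc hp]
        simp
    · have hpf : pvIsMarker p = false := by simpa using hp
      have hstep : pvStepA (acc, cur) p = (acc, cur ++ [p]) := by
        simp [pvStepA, pvIsMarker] at hpf ⊢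
        simp [hpf]
      rw [hstep, ih acc (cur ++ [p]) (by
        intro x hx
        rcases List.mem_append.mp hx with hx | hx
        · exact h x hx
        · simp at hx; subst hx; exact hpf)]
      simp

-- ===== VERDICT (by name: the statement is the Claim_ definition above) =====
theorem split_by_silence_markers_spec : Claim_equal_split_by_silence_markers := by
  unfold Claim_equal_split_by_silence_markers
  intro s _
  unfold Spec_split_by_silence_markers split_by_silence_markers split_by_silence_markers_alt
  simpa using pvInv ((PySem.Str.split? s " ").getD []) [] [] (by simp)
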